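-- pv_equiv track=rewrite | github.com/ssu-csec/Project-Ransomware | HDLocker_recover.py | longest_ascii_run
-- ===== SOURCE A (Python) =====
-- def longest_ascii_run(data):
--     """Length of longest contiguous run of printable bytes (incl. \\t \\n \\r)."""
--     best = cur = 0
--     for b in data:
--         if (0x20 <= b < 0x7f) or b in (0x09, 0x0a, 0x0d):
--             cur += 1
--             if cur > best: best = cur
--         else:
--             cur = 0
--     return best
-- ===== SOURCE B (Python) =====
-- def longest_ascii_run(data):
--     """Length of longest contiguous run of printable bytes (incl. \\t \\n \\r)."""
--     printable = lambda b: (0x20 <= b < 0x7f) or b in (0x09, 0x0a, 0x0d)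
--     best = 0
--     i, n = 0, len(data)
--     while i < n:
--         k = printable(data[i])
--         j = i + 1
--         while j < n and printable(data[j]) == k:
--             j += 1
--         if k:
--             best = max(best, j - i)
--         i = j
--     return best
-- ===== Notes on version B (the rewrite author's own statement) =====
-- stated objective: alternative
-- what changed: B partitions the input into maximal same-key groups (groupby-style span scan) and takes the maximum length of the printable groups, instead of A's per-byte increment/reset accumulator.
import Mathlib
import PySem

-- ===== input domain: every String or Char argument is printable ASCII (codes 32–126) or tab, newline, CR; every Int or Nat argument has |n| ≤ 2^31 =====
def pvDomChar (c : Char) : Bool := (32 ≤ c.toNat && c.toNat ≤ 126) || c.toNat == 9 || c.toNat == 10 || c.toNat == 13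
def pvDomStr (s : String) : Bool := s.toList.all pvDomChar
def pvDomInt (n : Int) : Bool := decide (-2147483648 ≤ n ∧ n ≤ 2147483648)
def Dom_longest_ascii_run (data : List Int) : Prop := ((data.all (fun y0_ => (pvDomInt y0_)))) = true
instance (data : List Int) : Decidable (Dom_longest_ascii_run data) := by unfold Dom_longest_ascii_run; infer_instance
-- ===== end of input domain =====

-- B replaces A's inline increment/reset accumulator by a groupby-style span scan
-- (maximal same-key groups, maximum length of the printable ones); alternative, same cost.

-- shared predicate: '(0x20 <= b < 0x7f) or b in (0x09, 0x0a, 0x0d)', identical in both sources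
def pvPrintable (b : Int) : Bool := (decide (32 ≤ b) && decide (b < 127)) || b == 9 || b == 10 || b == 13

-- ===== PORT A =====
-- the loop body of A: cur += 1; if cur > best: best = cur / else cur = 0
def pvStepA (s : Int × Int) (b : Int) : Int × Int :=
  if pvPrintable b then
    let cur := s.2 + 1
    let best := if cur > s.1 then cur else s.1
    (best, cur)
  else (s.1, 0)

def longest_ascii_run (data : List Int) : Int :=
  (data.foldl pvStepA (0, 0)).1

-- ===== PORT B =====
-- Source B's outer while loop: peel one maximal same-key group (element + span of equal keys),
-- record its length if the key is printable, continue after the group.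
def pvAltGo (data : List Int) : Int :=
  match data with
  | [] => 0
  | b :: rest =>
    let k := pvPrintable b
    let grpRest := rest.takeWhile (fun x => pvPrintable x == k)
    let rest' := rest.dropWhile (fun x => pvPrintable x == k)
    let r := pvAltGo rest'
    if k then max r (1 + (grpRest.length : Int)) else r
termination_by data.length
decreasing_by
  simp only [List.length_cons]
  exact Nat.lt_succ_of_le (List.length_dropWhile_le _ _)

def longest_ascii_run_alt (data : List Int) : Int := pvAltGo data

-- ===== PRECONDITION & SPEC =====
def Spec_longest_ascii_run (data : List Int) (out : Int) : Prop := out = longest_ascii_run_alt data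
instance (data : List Int) (out : Int) : Decidable (Spec_longest_ascii_run data out) := by unfold Spec_longest_ascii_run; infer_instance

-- ===== CLAIM (what is proved, stated in full; the proofs are below) =====
def Claim_equal_longest_ascii_run : Prop := ∀ (data : List Int), Dom_longest_ascii_run data → Spec_longest_ascii_run data (longest_ascii_run data)

-- ===== LEMMAS AND PROOFS =====

-- 'best over the remaining bytes, given a current run of length cur' (A's loop, best factored out)
def pvM : List Int → Int → Int
  | [], _ => 0
  | b :: t, cur => if pvPrintable b then max (cur + 1) (pvM t (cur + 1)) else pvM t 0

theorem pvFold_eq_max_pvM (t : List Int) :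
    ∀ best cur : Int, 0 ≤ best →
      (t.foldl pvStepA (best, cur)).1 = max best (pvM t cur) := by
  induction t with
  | nil => intro best cur hb; simp [pvM, hb]
  | cons b t ih =>
    intro best cur hb
    simp only [List.foldl_cons, pvStepA, pvM]
    split
    · rw [show (if cur + 1 > best then cur + 1 else best) = max best (cur + 1) by
        simp [max_def]; split <;> split <;> omega]
      rw [ih _ _ (le_trans hb (le_max_left _ _))]
      omega
    · exact ih _ _ hb

theorem pvAltGo_cons_pos {b : Int} {t : List Int} (hb : pvPrintable b = true) :
    pvAltGo (b :: t) =
      max (pvAltGo (t.dropWhile pvPrintable)) (1 + ((t.takeWhile pvPrintable).length : Int)) := by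
  rw [pvAltGo]; simp [hb]

theorem pvAltGo_cons_neg {b : Int} {t : List Int} (hb : pvPrintable b = false) :
    pvAltGo (b :: t) = pvAltGo (t.dropWhile (fun x => pvPrintable x == false)) := by
  rw [pvAltGo]; simp [hb]

theorem pvAltGo_nonneg_aux : ∀ (n : Nat) (data : List Int), data.length ≤ n → 0 ≤ pvAltGo data
  | _, [], _ => by rw [pvAltGo]
  | n + 1, b :: t, h => by
    have hlen : (t.dropWhile (fun x => pvPrintable x == pvPrintable b)).length ≤ n := by
      have := List.length_dropWhile_le (fun x => pvPrintable x == pvPrintable b) t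
      simp only [List.length_cons] at h
      omega
    by_cases hb : pvPrintable b = true
    · rw [pvAltGo_cons_pos hb]
      have h1 := pvAltGo_nonneg_aux n (t.dropWhile pvPrintable) (by simpa [hb] using hlen)
      have h2 : (0 : Int) ≤ 1 + ((t.takeWhile pvPrintable).length : Int) := by positivity
      omega
    · have hb' : pvPrintable b = false := by simpa using hb
      rw [pvAltGo_cons_neg hb']
      exact pvAltGo_nonneg_aux n _ (by simpa [hb'] using hlen)

theorem pvAltGo_nonneg (data : List Int) : 0 ≤ pvAltGo data :=
  pvAltGo_nonneg_aux data.length data le_rfl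

theorem pvM_eq_pvAltGo (data : List Int) :
    ∀ cur : Int, 0 ≤ cur →
      pvM data cur =
        if (data.takeWhile pvPrintable).length = 0 then pvAltGo data
        else max (pvAltGo data) (cur + ((data.takeWhile pvPrintable).length : Int)) := by
  induction data with
  | nil => intro cur _; simp [pvM, pvAltGo]
  | cons b t ih =>
    intro cur hc
    by_cases hb : pvPrintable b = true
    · -- head printable: B's group is b plus the printable prefix of t
      rw [List.takeWhile_cons_of_pos hb, pvAltGo_cons_pos hb]
      simp only [pvM, List.length_cons]
      rw [if_pos hb, if_neg (show ¬((t.takeWhile pvPrintable).length + 1 = 0) by omega)]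
      cases t with
      | nil => simp [pvM, pvAltGo]; omega
      | cons c u =>
        rw [ih (cur + 1) (by omega)]
        by_cases hcp : pvPrintable c = true
        · rw [List.takeWhile_cons_of_pos hcp, List.dropWhile_cons_of_pos hcp,
            pvAltGo_cons_pos hcp, if_neg (by simp)]
          simp only [List.length_cons]
          have := pvAltGo_nonneg (u.dropWhile pvPrintable)
          push_cast
          omega
        · have hcp' : pvPrintable c = false := by simpa using hcp
          rw [List.takeWhile_cons_of_neg (by simp [hcp'])]
          simp only [List.length_nil]
          rw [if_pos trivial, List.dropWhile_cons_of_neg (by simp [hcp'])]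
          have := pvAltGo_nonneg (c :: u)
          push_cast
          omega
    · -- head not printable: A resets; B skips the non-printable group
      have hb' : pvPrintable b = false := by simpa using hb
      rw [List.takeWhile_cons_of_neg (by simp [hb']), pvAltGo_cons_neg hb']
      simp only [pvM, List.length_nil]
      rw [if_neg (by simp [hb']), if_pos trivial]
      cases t with
      | nil => simp [pvM, pvAltGo]
      | cons c u =>
        rw [ih 0 le_rfl]
        by_cases hcp : pvPrintable c = true
        · rw [List.takeWhile_cons_of_pos hcp, List.dropWhile_cons_of_neg (by simp [hcp]),
            if_neg (by simp), pvAltGo_cons_pos hcp]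
          simp only [List.length_cons]
          have := pvAltGo_nonneg (u.dropWhile pvPrintable)
          push_cast
          omega
        · have hcp' : pvPrintable c = false := by simpa using hcp
          rw [List.takeWhile_cons_of_neg (by simp [hcp']),
            List.dropWhile_cons_of_pos (by simp [hcp']), pvAltGo_cons_neg hcp']
          simp

-- ===== VERDICT (by name: the statement is the Claim_ definition above) =====
theorem longest_ascii_run_spec : Claim_equal_longest_ascii_run := by
  intro data _
  unfold Spec_longest_ascii_run longest_ascii_run longest_ascii_run_alt
  rw [pvFold_eq_max_pvM data 0 0 le_rfl, pvM_eq_pvAltGo data 0 le_rfl]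
  have hgo := pvAltGo_nonneg data
  split
  · omega
  · rename_i hlen
    rcases data with _ | ⟨b, t⟩
    · simp at hlen
    · by_cases hb : pvPrintable b = true
      · rw [List.takeWhile_cons_of_pos hb, pvAltGo_cons_pos hb]
        simp only [List.length_cons]
        have := pvAltGo_nonneg (t.dropWhile pvPrintable)
        push_cast
        omega
      · rw [List.takeWhile_cons_of_neg (by simpa using hb)] at hlen
        simp at hlen
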